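-- pv_equiv track=rewrite | github.com/heesungjang/algorithms-playground | python/final-exam.py | isGoodID
-- ===== SOURCE A (Python) =====
-- def isGoodID(l_num):
--     """
--     this function takes licence number(str) as an argument.
--
--     It then validates the licence number and returns boolean value
--     True if validate number
--     False if not validate number
--     """
--
--     # 1. consisting of 3 digits.
--     # 2. Each of the 3 digit sequences is separated by a "-".
--     sub_strings = l_num.split("-")
--
--     if len(sub_strings) != 3:
--         return False
--     for sub_string in sub_strings:
--         if len(sub_string) != 3:
--             return False
--
--     # 3. The first digit for the first 3 digit sequence not "0"
--     if sub_strings[0][0] == "0":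
--         return False
--
--     # 4. The last digit for the second 3 digit sequence is an odd number.
--     if int(sub_strings[1][-1]) % 2 == 0:
--         return False
--
--     # 5. At least two digits of the driver's licence number are the same
--     numbers = [num for num in l_num if num.isnumeric()]
--     repeated = 0
--     for i in range(len(numbers)):
--         for j in range(i + 1, len(numbers)):
--             if numbers[i] == numbers[j]:
--                 repeated += 1
--     if repeated == 0:
--         return False
--
--     # 6. No digit appears more than three times (e.g. "113-099-994" is invalid).
--     for i in range(len(numbers)):
--         cnt = 0
--         for j in range(len(numbers)):
--             if numbers[j] == numbers[i]:
--                 cnt += 1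
--         if cnt > 3:
--             return False
--     return True
-- ===== SOURCE B (Python) =====
-- def isGoodID(l_num):
--     # Same format guards as the original (including int() on the middle group's
--     # last character, so the same ValueError fires on non-digit input there).
--     sub_strings = l_num.split("-")
--     if len(sub_strings) != 3:
--         return False
--     for sub_string in sub_strings:
--         if len(sub_string) != 3:
--             return False
--     if sub_strings[0][0] == "0":
--         return False
--     if int(sub_strings[1][-1]) % 2 == 0:
--         return False
--     # One frequency table replaces both nested O(n^2) scans.
--     counts = {}
--     for c in l_num:
--         if c.isnumeric():
--             counts[c] = counts.get(c, 0) + 1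
--     vals = counts.values()
--     # rule 5: some digit repeats; rule 6: no digit more than three times.
--     if not any(v >= 2 for v in vals):
--         return False
--     return all(v <= 3 for v in vals)
-- ===== Notes on version B (the rewrite author's own statement) =====
-- stated objective: faster
-- what changed: The two nested O(n^2) digit scans (pair counting for rule 5, per-digit occurrence counting for rule 6) are replaced by one frequency dictionary built in a single pass plus two aggregate checks over its values; the format guards are unchanged.
import Mathlib
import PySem

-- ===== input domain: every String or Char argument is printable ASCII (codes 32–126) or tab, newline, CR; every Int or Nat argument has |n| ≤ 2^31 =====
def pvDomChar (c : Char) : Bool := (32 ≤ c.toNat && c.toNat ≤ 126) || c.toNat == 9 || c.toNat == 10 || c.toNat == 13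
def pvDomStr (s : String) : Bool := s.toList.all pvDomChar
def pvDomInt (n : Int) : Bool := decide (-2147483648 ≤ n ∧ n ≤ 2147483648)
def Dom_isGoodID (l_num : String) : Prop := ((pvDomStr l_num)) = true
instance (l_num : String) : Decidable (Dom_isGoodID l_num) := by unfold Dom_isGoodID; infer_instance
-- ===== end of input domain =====

-- B replaces A's two nested O(n^2) digit scans by one frequency table (dict) plus two
-- aggregate checks; the format guards are unchanged.  (On the ASCII domain Dom, the per-char
-- isnumeric() test coincides with isdigit, which both ports use.)

-- ===== PORT A =====
def isGoodID (l_num : String) : Bool :=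
  let sub_strings := (PySem.Str.split? l_num "-").getD []
  if sub_strings.length ≠ 3 then false
  else if sub_strings.any (fun s => PySem.Str.len s ≠ 3) then false
  else if PySem.List.pyGetD (sub_strings.getD 0 "").toList 0 ' ' == '0' then false
  else
    -- int(sub_strings[1][-1]): Pre_ excludes the inputs where Python raises ValueError here
    let d := (PySem.Int.ofChars? [(PySem.List.pyGet? (sub_strings.getD 1 "").toList (-1)).getD ' ']).getD 0
    if PySem.Int.mod d 2 == 0 then false
    else
      let numbers := l_num.toList.filter (fun c => PySem.Chars.isdigit c)
      let n : Int := numbers.length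
      let repeated := (PySem.List.pyRange 0 n).foldl (fun acc i =>
        (PySem.List.pyRange (i + 1) n).foldl (fun acc2 j =>
          if PySem.List.pyGetD numbers j ' ' == PySem.List.pyGetD numbers i ' ' then acc2 + 1
          else acc2) acc) (0 : Int)
      if repeated == 0 then false
      else if (PySem.List.pyRange 0 n).any (fun i =>
        ((PySem.List.pyRange 0 n).foldl (fun cnt j =>
          if PySem.List.pyGetD numbers j ' ' == PySem.List.pyGetD numbers i ' ' then cnt + 1
          else cnt) (0 : Int)) > 3) then false
      else true

-- ===== PORT B =====
def isGoodID_alt (l_num : String) : Bool :=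
  let sub_strings := (PySem.Str.split? l_num "-").getD []
  if sub_strings.length ≠ 3 then false
  else if sub_strings.any (fun s => PySem.Str.len s ≠ 3) then false
  else if PySem.List.pyGetD (sub_strings.getD 0 "").toList 0 ' ' == '0' then false
  else
    let d := (PySem.Int.ofChars? [(PySem.List.pyGet? (sub_strings.getD 1 "").toList (-1)).getD ' ']).getD 0
    if PySem.Int.mod d 2 == 0 then false
    else
      let counts := l_num.toList.foldl (fun dct c =>
        if PySem.Chars.isdigit c then dct.insert c (dct.getD c 0 + 1) else dct)
        (PySem.Dict.empty : PySem.Dict Char Int)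
      let vals := counts.values
      if !(vals.any (fun v => v ≥ 2)) then false
      else vals.all (fun v => v ≤ 3)

-- ===== PRECONDITION & SPEC =====
-- Pre_ excludes exactly the inputs on which A raises ValueError: those where the format
-- guards pass but the last character of the middle group is not a decimal digit
-- (a single printable-ASCII character parses as int iff it is '0'..'9').
def Pre_isGoodID (l_num : String) : Prop :=
  (let parts := (PySem.Str.split? l_num "-").getD []
   parts.length = 3 ∧ (∀ p ∈ parts, p.toList.length = 3) ∧
     (parts.getD 0 "").toList.getD 0 ' ' ≠ '0') →
  PySem.Chars.isdigit ((((PySem.Str.split? l_num "-").getD []).getD 1 "").toList.getD 2 ' ') = true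
instance (l_num : String) : Decidable (Pre_isGoodID l_num) := by unfold Pre_isGoodID; infer_instance
def pvWitness_isGoodID : String := "123-457-138"
def Spec_isGoodID (l_num : String) (out : Bool) : Prop := out = isGoodID_alt l_num
instance (l_num : String) (out : Bool) : Decidable (Spec_isGoodID l_num out) := by unfold Spec_isGoodID; infer_instance

-- ===== CLAIM (what is proved, stated in full; the proofs are below) =====
def Claim_equal_isGoodID : Prop := ∀ (l_num : String), Dom_isGoodID l_num → Pre_isGoodID l_num → Spec_isGoodID l_num (isGoodID l_num)

-- ===== LEMMAS AND PROOFS =====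

theorem pv_sum_nonneg_eq_zero (l : List Int) (h : ∀ x ∈ l, 0 ≤ x) :
    l.sum = 0 ↔ ∀ x ∈ l, x = 0 := by
  induction l with
  | nil => simp
  | cons a t ih =>
    have ha := h a (by simp)
    have ht : ∀ x ∈ t, 0 ≤ x := fun x hx => h x (by simp [hx])
    have hs : 0 ≤ t.sum := List.sum_nonneg ht
    simp only [List.sum_cons, List.mem_cons]
    constructor
    · intro h0
      have : a = 0 ∧ t.sum = 0 := by omega
      exact fun x hx => hx.elim (fun e => e ▸ this.1) (fun hm => (ih ht).mp this.2 x hm)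
    · intro h0
      have h1 : a = 0 := h0 a (Or.inl rfl)
      have h2 : t.sum = 0 := (ih ht).mpr (fun x hx => h0 x (Or.inr hx))
      omega

-- A's pair-counting loop is zero iff the digit list has no duplicates
theorem pv_repeated_eq_zero (xs : List Char) :
    (((PySem.List.pyRange 0 (xs.length : Int)).foldl (fun acc i =>
        (PySem.List.pyRange (i + 1) (xs.length : Int)).foldl (fun acc2 j =>
          if PySem.List.pyGetD xs j ' ' == PySem.List.pyGetD xs i ' ' then acc2 + 1
          else acc2) acc) (0 : Int)) = 0) ↔ xs.Nodup := by
  rw [PySem.List.foldl_congr_mem (PySem.List.pyRange 0 (xs.length : Int))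
    (fun acc i => (PySem.List.pyRange (i + 1) (xs.length : Int)).foldl (fun acc2 j =>
        if PySem.List.pyGetD xs j ' ' == PySem.List.pyGetD xs i ' ' then acc2 + 1
        else acc2) acc)
    (fun acc i => acc + (((PySem.List.pyRange (i + 1) (xs.length : Int)).countP
      (fun j => PySem.List.pyGetD xs j ' ' == PySem.List.pyGetD xs i ' ')
      : Nat) : Int)) 0
    (fun acc i _ => PySem.List.foldl_if_add_one _ _ _)]
  rw [PySem.List.foldl_add, zero_add]
  rw [pv_sum_nonneg_eq_zero _ (by
    intro x hx
    obtain ⟨i, _, rfl⟩ := List.mem_map.mp hx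
    exact Int.natCast_nonneg _)]
  simp only [List.mem_map, PySem.List.mem_pyRange_one]
  rw [List.Nodup, List.pairwise_iff_getElem]
  constructor
  · intro h k m hk hm hkm heq
    have h0 := h (((PySem.List.pyRange ((k : Int) + 1) (xs.length : Int))).countP
      (fun j => PySem.List.pyGetD xs j ' ' == PySem.List.pyGetD xs (k : Int) ' ') : Int)
      ⟨(k : Int), ⟨by omega, by exact_mod_cast hk⟩, rfl⟩
    have h1 : ∀ j ∈ PySem.List.pyRange ((k : Int) + 1) (xs.length : Int),
        ¬ (PySem.List.pyGetD xs j ' ' == PySem.List.pyGetD xs (k : Int) ' ') = true := by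
      apply List.countP_eq_zero.mp
      exact_mod_cast h0
    apply h1 (m : Int) (PySem.List.mem_pyRange_one.mpr ⟨by omega, by exact_mod_cast hm⟩)
    rw [PySem.List.pyGetD_eq_getElem xs ' ' (by omega) (by exact_mod_cast hm),
        PySem.List.pyGetD_eq_getElem xs ' ' (by omega) (by exact_mod_cast hk)]
    simp [heq]
  · intro h x hx
    obtain ⟨i, ⟨h0, h1⟩, rfl⟩ := hx
    have : ((PySem.List.pyRange (i + 1) (xs.length : Int)).countP
        (fun j => PySem.List.pyGetD xs j ' ' == PySem.List.pyGetD xs i ' ')) = 0 := by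
      apply List.countP_eq_zero.mpr
      intro j hj
      obtain ⟨hj0, hj1⟩ := PySem.List.mem_pyRange_one.mp hj
      rw [PySem.List.pyGetD_eq_getElem xs ' ' (by omega) hj1,
          PySem.List.pyGetD_eq_getElem xs ' ' h0 h1]
      simp only [beq_iff_eq]
      exact fun he => h i.toNat j.toNat (by omega) (by omega) (by omega) he.symm
    exact_mod_cast this

-- the inner occurrence-counting scan over all indices is List.count
theorem pv_countP_range (xs : List Char) (c : Char) :
    List.countP (fun j => PySem.List.pyGetD xs j ' ' == c) (PySem.List.pyRange 0 (xs.length : Int))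
      = xs.count c := by
  conv_rhs => rw [← PySem.List.map_pyGetD_pyRange_zero xs ' ']
  rw [List.count, List.countP_map]
  rfl

theorem pv_rule6_eq (xs : List Char) :
    ((PySem.List.pyRange 0 (xs.length : Int)).any (fun i =>
        ((PySem.List.pyRange 0 (xs.length : Int)).foldl (fun cnt j =>
          if PySem.List.pyGetD xs j ' ' == PySem.List.pyGetD xs i ' ' then cnt + 1
          else cnt) (0 : Int)) > 3)) = xs.any (fun c => 3 < xs.count c) := by
  apply Bool.eq_iff_iff.mpr
  simp only [List.any_eq_true, PySem.List.foldl_if_add_one, pv_countP_range, zero_add,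
    PySem.List.mem_pyRange_one, decide_eq_true_eq]
  constructor
  · rintro ⟨i, ⟨h0, h1⟩, h⟩
    have hi : i.toNat < xs.length := by omega
    refine ⟨xs[i.toNat], List.getElem_mem hi, ?_⟩
    rw [PySem.List.pyGetD_eq_getElem xs ' ' h0 h1] at h
    exact_mod_cast h
  · rintro ⟨c, hc, h⟩
    obtain ⟨k, hk, rfl⟩ := List.mem_iff_getElem.mp hc
    refine ⟨(k : Int), ⟨by omega, by exact_mod_cast hk⟩, ?_⟩
    rw [PySem.List.pyGetD_eq_getElem xs ' ' (by omega) (by exact_mod_cast hk)]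
    simp only [Int.toNat_natCast]
    exact_mod_cast h

-- B's table checks expressed by membership
theorem pv_vals_any (xs : List Char) :
    ((PySem.Dict.counter xs).values.any (fun v => v ≥ 2)) = xs.any (fun c => 2 ≤ xs.count c) := by
  rw [PySem.Dict.values_eq_map_keys _ (PySem.Dict.nodup_keys_counter xs) 0, PySem.Dict.keys_counter]
  simp only [List.any_map]
  apply Bool.eq_iff_iff.mpr
  simp only [List.any_eq_true, PySem.Set.mem_ofList, Function.comp, PySem.Dict.getD_counter,
    decide_eq_true_eq]
  constructor
  · rintro ⟨c, hc, h⟩; exact ⟨c, hc, by exact_mod_cast h⟩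
  · rintro ⟨c, hc, h⟩; exact ⟨c, hc, by exact_mod_cast h⟩

theorem pv_vals_all (xs : List Char) :
    ((PySem.Dict.counter xs).values.all (fun v => v ≤ 3)) = xs.all (fun c => xs.count c ≤ 3) := by
  rw [PySem.Dict.values_eq_map_keys _ (PySem.Dict.nodup_keys_counter xs) 0, PySem.Dict.keys_counter]
  simp only [List.all_map]
  apply Bool.eq_iff_iff.mpr
  simp only [List.all_eq_true, PySem.Set.mem_ofList, Function.comp, PySem.Dict.getD_counter,
    decide_eq_true_eq]
  constructor
  · intro h c hc; exact_mod_cast h c hc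
  · intro h c hc; exact_mod_cast h c hc

theorem pv_core (xs : List Char) :
    ((if (((PySem.List.pyRange 0 (xs.length : Int)).foldl (fun acc i =>
        (PySem.List.pyRange (i + 1) (xs.length : Int)).foldl (fun acc2 j =>
          if PySem.List.pyGetD xs j ' ' == PySem.List.pyGetD xs i ' ' then acc2 + 1
          else acc2) acc) (0 : Int)) == 0) then false
      else if (PySem.List.pyRange 0 (xs.length : Int)).any (fun i =>
        ((PySem.List.pyRange 0 (xs.length : Int)).foldl (fun cnt j =>
          if PySem.List.pyGetD xs j ' ' == PySem.List.pyGetD xs i ' ' then cnt + 1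
          else cnt) (0 : Int)) > 3) then false
      else true) : Bool)
    = (if !((PySem.Dict.counter xs).values.any (fun v => v ≥ 2)) then false
       else (PySem.Dict.counter xs).values.all (fun v => v ≤ 3)) := by
  rw [pv_rule6_eq, pv_vals_any, pv_vals_all]
  have hdup : (xs.any (fun c => 2 ≤ xs.count c)) = !decide xs.Nodup := by
    apply Bool.eq_iff_iff.mpr
    simp only [List.any_eq_true, decide_eq_true_eq, Bool.not_eq_eq_eq_not, Bool.not_true,
      decide_eq_false_iff_not, List.nodup_iff_count_le_one, not_forall, not_le]
    constructor
    · rintro ⟨c, _, h⟩; exact ⟨c, by omega⟩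
    · rintro ⟨c, h⟩
      exact ⟨c, List.count_pos_iff.mp (by omega), by omega⟩
  have h34 : (xs.any fun c => 3 < xs.count c) = !(xs.all fun c => xs.count c ≤ 3) := by
    apply Bool.eq_iff_iff.mpr
    simp only [List.any_eq_true, decide_eq_true_eq, Bool.not_eq_eq_eq_not, Bool.not_true,
      List.all_eq_false, not_le]
  by_cases hnd : xs.Nodup
  · rw [if_pos (beq_iff_eq.mpr ((pv_repeated_eq_zero xs).mpr hnd)), hdup]
    simp [hnd]
  · have h0 := (not_iff_not.mpr (pv_repeated_eq_zero xs)).mpr hnd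
    rw [if_neg (by simpa using h0), hdup, h34]
    simp only [hnd, decide_false, Bool.not_false]
    cases xs.all fun c => xs.count c ≤ 3 <;> simp

-- ===== VERDICT (by name: the statement is the Claim_ definition above) =====
theorem isGoodID_spec : Claim_equal_isGoodID := by
  intro l _ _
  unfold Spec_isGoodID isGoodID isGoodID_alt
  dsimp only
  conv_rhs => rw [PySem.List.foldl_if_eq_foldl_filter, PySem.Dict.foldl_insert_getD_add_one_eq_counter,
    ← pv_core]
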